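-- pv_equiv track=rewrite | github.com/bassil/codefights | arcade/core/corner_of_0s_and_1s/equal_pair_of_bits.py | equalPairOfBits
-- ===== SOURCE A (Python) =====
-- def equalPairOfBits(n, m):
--     """
--     return 2^(position) of rightmost pair of equal bits in binary reprentation
--
--     >>> equalPairOfBits(10, 11)
--     2
--
--     >>> equalPairOfBits(895, 928)
--     32
--
--     >>> equalPairOfBits(1073741824, 1006895103)
--     262144
--     """
--     binary_n = bin(n)[2:]
--     binary_m = bin(m)[2:]
--
--     # pad shorter binary number with 0's
--     padding = "0"*(abs(len(binary_m) - len(binary_n)))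
--
--     if len(binary_m) > len(binary_n):
--         binary_n = padding + binary_n
--     else:
--         binary_m = padding + binary_m
--
--     position_from_right = 0
--
--     # find the bit, starting from the right, in which n and m differ
--     for binary_index in list(range(len(binary_m)-1, -1, -1)):
--         if binary_n[binary_index] == binary_m[binary_index]:
--             break
--         position_from_right+=1
--
--     return 2**position_from_right
-- ===== SOURCE B (Python) =====
-- def equalPairOfBits(n, m):
--     x = n ^ m
--     return (~x) & (x + 1)
-- ===== Notes on version B (the rewrite author's own statement) =====
-- stated objective: idiomatic
-- what changed: Replaces the binary-string building, zero-padding and right-to-left character scan with a single closed-form bit expression: the result is the lowest zero bit of n^m, i.e. (~x)&(x+1).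
-- outside the precondition, e.g. on equalPairOfBits(-1, 0): A returns 4, B returns 0; on equalPairOfBits(-5, 3): A returns 1, B returns 1
import Mathlib
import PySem

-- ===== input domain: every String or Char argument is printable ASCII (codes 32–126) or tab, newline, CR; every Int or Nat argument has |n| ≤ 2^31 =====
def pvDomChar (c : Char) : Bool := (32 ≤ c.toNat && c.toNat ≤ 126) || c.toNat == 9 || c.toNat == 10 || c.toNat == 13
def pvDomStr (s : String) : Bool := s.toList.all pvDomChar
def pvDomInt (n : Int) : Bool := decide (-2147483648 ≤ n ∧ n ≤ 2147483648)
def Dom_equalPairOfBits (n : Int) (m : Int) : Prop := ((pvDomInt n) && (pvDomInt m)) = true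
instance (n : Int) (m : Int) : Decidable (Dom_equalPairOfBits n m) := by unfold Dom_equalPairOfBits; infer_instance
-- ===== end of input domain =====

-- B replaces A's binary-string building, padding and right-to-left character scan
-- with the closed-form bit expression (~x) & (x + 1) on x = n ^ m (same value on all
-- nonnegative inputs; negatives are outside Pre_, where bin()[2:] is malformed).

-- ===== PORT A =====
-- helper for A's for-loop with break: scans the index list, counting until equal chars
def eqLoop (bn bm : List Char) : List Int → Nat → Nat
  | [], pos => pos
  | i :: rest, pos =>
    if PySem.List.pyGetD bn i ' ' = PySem.List.pyGetD bm i ' ' then pos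
    else eqLoop bn bm rest (pos + 1)

def equalPairOfBits (n : Int) (m : Int) : Int :=
  let binary_n := PySem.List.slice (PySem.Int.toBinChars0b n) (some 2) none
  let binary_m := PySem.List.slice (PySem.Int.toBinChars0b m) (some 2) none
  let padding := List.replicate (PySem.List.len binary_m - PySem.List.len binary_n).natAbs '0'
  let bn := if PySem.List.len binary_m > PySem.List.len binary_n then padding ++ binary_n else binary_n
  let bm := if PySem.List.len binary_m > PySem.List.len binary_n then binary_m else padding ++ binary_m
  let pos := eqLoop bn bm (PySem.List.pyRange (PySem.List.len bm - 1) (-1) (-1)) 0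
  2 ^ pos

-- ===== PORT B =====
-- B: the answer is the lowest zero bit of x = n ^ m, computed as (~x) & (x + 1)
def equalPairOfBits_alt (n : Int) (m : Int) : Int :=
  let x := PySem.Int.bxor n m
  PySem.Int.band (Int.not x) (x + 1)

-- ===== PRECONDITION & SPEC =====
-- Pre_ restricts to the function's natural domain, nonnegative integers: for a negative
-- argument bin(...)[2:] yields a malformed string ("b101"), and A's character
-- comparisons there are an accident of that string shape, not a bit-pattern semantics.
def Pre_equalPairOfBits (n : Int) (m : Int) : Prop := 0 ≤ n ∧ 0 ≤ m
instance (n : Int) (m : Int) : Decidable (Pre_equalPairOfBits n m) := by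
  unfold Pre_equalPairOfBits; infer_instance

def pvWitness_equalPairOfBits : Int × Int := (10, 11)

def Spec_equalPairOfBits (n : Int) (m : Int) (out : Int) : Prop := out = equalPairOfBits_alt n m
instance (n : Int) (m : Int) (out : Int) : Decidable (Spec_equalPairOfBits n m out) := by unfold Spec_equalPairOfBits; infer_instance

-- ===== CLAIM (what is proved, stated in full; the proofs are below) =====
def Claim_equal_equalPairOfBits : Prop := ∀ (n : Int) (m : Int), Dom_equalPairOfBits n m → Pre_equalPairOfBits n m → Spec_equalPairOfBits n m (equalPairOfBits n m)

-- ===== LEMMAS AND PROOFS =====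

-- LSB-first binary digit characters of a natural number
def lsb (a : Nat) : List Char :=
  Nat.digitChar (a % 2) :: (if a < 2 then [] else lsb (a / 2))
decreasing_by exact Nat.div_lt_self (by omega) (by omega)

-- number of trailing one-bits
def tOnes (c : Nat) : Nat :=
  if c % 2 = 0 then 0 else tOnes (c / 2) + 1
decreasing_by exact Nat.div_lt_self (by omega) (by omega)

-- count of leading pairwise-differing characters
def scanDiff : List Char → List Char → Nat
  | x :: xs, y :: ys => if x = y then 0 else scanDiff xs ys + 1
  | _, _ => 0

-- descending index list [k-1, ..., 0]
def idxList : Nat → List Int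
  | 0 => []
  | k + 1 => (k : Int) :: idxList k

theorem lsb_eq (a : Nat) :
    lsb a = Nat.digitChar (a % 2) :: (if a < 2 then [] else lsb (a / 2)) := by
  rw [lsb]

theorem lsb_zero : lsb 0 = ['0'] := by
  rw [lsb_eq]; norm_num
  rfl

theorem lsb_length_pos (a : Nat) : 0 < (lsb a).length := by
  rw [lsb_eq]; simp

theorem lsb_length_small (a : Nat) (h : a < 2) : (lsb a).length = 1 := by
  rw [lsb_eq]; simp [h]

theorem lsb_length_of_ge (a : Nat) (h : ¬ a < 2) :
    (lsb a).length = (lsb (a / 2)).length + 1 := by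
  conv_lhs => rw [lsb_eq]
  simp [h]

theorem toDigitsCore_eq_lsb (f : Nat) : ∀ (n : Nat) (ds : List Char), n < f →
    Nat.toDigitsCore 2 f n ds = (lsb n).reverse ++ ds := by
  induction f with
  | zero => intro n ds h; omega
  | succ f ih =>
    intro n ds h
    rw [Nat.toDigitsCore]
    by_cases h2 : n / 2 = 0
    · have hn2 : n < 2 := by omega
      simp only [h2, if_true]
      conv_rhs => rw [lsb_eq]
      simp [hn2]
    · have hn2 : ¬ n < 2 := by omega
      simp only [h2, if_false]
      rw [ih (n / 2) _ (by omega)]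
      conv_rhs => rw [lsb_eq]
      simp [hn2]

theorem toDigits_eq_lsb (a : Nat) : Nat.toDigits 2 a = (lsb a).reverse := by
  rw [Nat.toDigits, toDigitsCore_eq_lsb (a + 1) a [] (by omega)]
  simp

theorem map_range_desc (L : Nat) :
    List.map (fun k : Nat => ((L : Int) - 1) + (-1) * (k : Int)) (List.range L) = idxList L := by
  induction L with
  | zero => simp [idxList]
  | succ L ih =>
    rw [List.range_succ_eq_map, List.map_cons, List.map_map, idxList]
    refine congrArg₂ _ (by push_cast; ring) ?_
    rw [← ih]
    apply List.map_congr_left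
    intro k hk
    simp only [Function.comp_apply]
    push_cast; ring

-- the pyRange of A's loop is the descending index list
theorem pyRange_desc (L : Nat) :
    PySem.List.pyRange ((L : Int) - 1) (-1) (-1) = idxList L := by
  cases L with
  | zero =>
    rw [PySem.List.pyRange]
    norm_num [idxList]
  | succ L =>
    rw [PySem.List.pyRange]
    have hne : ¬ ((-1 : Int) = 0) := by norm_num
    have h1 : ¬ (0 : Int) < -1 := by omega
    have h2 : (-1 : Int) < ((L + 1 : Nat) : Int) - 1 := by push_cast; omega
    simp only [if_neg hne, if_neg h1, if_pos h2]
    have hcount : ((((L + 1 : Nat) : Int) - 1 - -1 + - -1 - 1) / - -1).toNat = L + 1 := by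
      push_cast; omega
    rw [hcount, ← map_range_desc (L + 1)]

theorem eqLoop_take (bn bm : List Char) (hlen : bn.length = bm.length) :
    ∀ (k : Nat) (pos : Nat), k ≤ bn.length →
    eqLoop bn bm (idxList k) pos = pos + scanDiff (bn.take k).reverse (bm.take k).reverse := by
  intro k
  induction k with
  | zero => intro pos _; simp [idxList, eqLoop, scanDiff]
  | succ k ih =>
    intro pos hk
    have hkn : k < bn.length := by omega
    have hkm : k < bm.length := by omega
    rw [idxList, eqLoop]
    have gn : PySem.List.pyGetD bn (k : Int) ' ' = bn[k] := by
      rw [PySem.List.pyGetD_natCast]; exact List.getD_eq_getElem bn ' ' hkn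
    have gm : PySem.List.pyGetD bm (k : Int) ' ' = bm[k] := by
      rw [PySem.List.pyGetD_natCast]; exact List.getD_eq_getElem bm ' ' hkm
    have tn : (bn.take (k + 1)).reverse = bn[k] :: (bn.take k).reverse := by
      rw [List.take_add_one]
      simp [List.getElem?_eq_getElem hkn]
    have tm : (bm.take (k + 1)).reverse = bm[k] :: (bm.take k).reverse := by
      rw [List.take_add_one]
      simp [List.getElem?_eq_getElem hkm]
    rw [gn, gm, tn, tm, scanDiff]
    by_cases he : bn[k] = bm[k]
    · simp [he]
    · simp only [if_neg he]
      rw [ih (pos + 1) (by omega)]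
      omega

theorem mod_two_cases (a : Nat) : a % 2 = 0 ∨ a % 2 = 1 := by omega

theorem digitChar_mod_eq_iff (a b : Nat) :
    (Nat.digitChar (a % 2) = Nat.digitChar (b % 2)) ↔ a % 2 = b % 2 := by
  rcases mod_two_cases a with h1 | h1 <;> rcases mod_two_cases b with h2 | h2 <;>
    rw [h1, h2] <;> simp <;> decide

theorem xor_mod_two (a b : Nat) : (a ^^^ b) % 2 = (a % 2) ^^^ (b % 2) := by
  have h1 : ∀ x : Nat, x % 2 = x &&& 1 := fun x => (Nat.and_one_is_mod x).symm
  rw [h1 (a ^^^ b), Nat.and_xor_distrib_right, ← h1 a, ← h1 b]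

theorem xor_div_two (a b : Nat) : (a ^^^ b) / 2 = (a / 2) ^^^ (b / 2) := by
  have := @Nat.shiftRight_xor_distrib 1 a b
  simpa [Nat.shiftRight_one] using this

theorem tOnes_zero : tOnes 0 = 0 := by
  rw [tOnes]; exact if_pos rfl

theorem scanDiff_pad_eq_tOnes (s : Nat) : ∀ (a b p q : Nat), a + b ≤ s →
    p = (lsb b).length - (lsb a).length → q = (lsb a).length - (lsb b).length →
    scanDiff (lsb a ++ List.replicate p '0') (lsb b ++ List.replicate q '0')
      = tOnes (a ^^^ b) := by
  induction s with
  | zero =>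
    intro a b p q h hp hq
    have ha : a = 0 := by omega
    have hb : b = 0 := by omega
    subst ha; subst hb
    rw [lsb_zero] at hp hq ⊢
    simp at hp hq
    subst hp; subst hq
    rw [Nat.xor_self, tOnes_zero]
    decide
  | succ s ih =>
    intro a b p q hs hp hq
    rw [lsb_eq a, lsb_eq b]
    by_cases hmod : a % 2 = b % 2
    · -- heads equal: the scan stops immediately, and a ^^^ b is even
      have hd : Nat.digitChar (a % 2) = Nat.digitChar (b % 2) := by rw [hmod]
      simp only [List.cons_append, scanDiff, if_pos hd]
      rw [tOnes]
      have he : (a ^^^ b) % 2 = 0 := by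
        rw [xor_mod_two]
        rcases mod_two_cases b with h | h <;> simp [hmod, h]
      simp [he]
    · -- heads differ: recurse on the halves
      have hd : ¬ (Nat.digitChar (a % 2) = Nat.digitChar (b % 2)) := by
        rw [digitChar_mod_eq_iff]; exact hmod
      simp only [List.cons_append, scanDiff, if_neg hd]
      have hodd : ¬ ((a ^^^ b) % 2 = 0) := by
        rw [xor_mod_two]
        rcases mod_two_cases a with h1 | h1 <;> rcases mod_two_cases b with h2 | h2 <;>
          simp [h1, h2] at hmod ⊢
      conv_rhs => rw [tOnes]
      rw [if_neg hodd, xor_div_two]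
      by_cases ha2 : a < 2
      · by_cases hb2 : b < 2
        · -- both singletons: tails empty on both sides
          rw [lsb_length_small a ha2, lsb_length_small b hb2] at hp hq
          simp only [if_pos ha2, if_pos hb2]
          subst hp; subst hq
          simp only [List.replicate, List.nil_append, scanDiff]
          have ha' : a / 2 = 0 := by omega
          have hb' : b / 2 = 0 := by omega
          rw [ha', hb', Nat.xor_self, tOnes_zero]
        · -- a < 2 ≤ b: a's side is all padding; fold one '0' into lsb (a/2) = ['0']
          simp only [if_pos ha2, if_neg hb2]
          have ha' : a / 2 = 0 := by omega
          have hLb : (lsb b).length = (lsb (b / 2)).length + 1 := lsb_length_of_ge b hb2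
          have hLb2 : 0 < (lsb (b / 2)).length := lsb_length_pos _
          have hp' : p = ((lsb (b / 2)).length - (lsb (a / 2)).length) + 1 := by
            rw [hp, lsb_length_small a ha2, hLb, ha', lsb_zero]
            simp; omega
          have hq' : q = (lsb (a / 2)).length - (lsb (b / 2)).length := by
            rw [hq, lsb_length_small a ha2, hLb, ha', lsb_zero]
            simp; omega
          rw [hp', List.replicate_succ, List.nil_append]
          have : ('0' : Char) :: List.replicate ((lsb (b / 2)).length - (lsb (a / 2)).length) '0'
              = lsb (a / 2) ++ List.replicate ((lsb (b / 2)).length - (lsb (a / 2)).length) '0' := by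
            rw [ha', lsb_zero]; rfl
          rw [this]
          have hih := ih (a / 2) (b / 2) _ q (by omega) rfl hq'
          omega
      · by_cases hb2 : b < 2
        · -- b < 2 ≤ a: symmetric
          simp only [if_neg ha2, if_pos hb2]
          have hb' : b / 2 = 0 := by omega
          have hLa : (lsb a).length = (lsb (a / 2)).length + 1 := lsb_length_of_ge a ha2
          have hLa2 : 0 < (lsb (a / 2)).length := lsb_length_pos _
          have hq' : q = ((lsb (a / 2)).length - (lsb (b / 2)).length) + 1 := by
            rw [hq, lsb_length_small b hb2, hLa, hb', lsb_zero]
            simp; omega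
          have hp' : p = (lsb (b / 2)).length - (lsb (a / 2)).length := by
            rw [hp, lsb_length_small b hb2, hLa, hb', lsb_zero]
            simp; omega
          rw [hq', List.replicate_succ, List.nil_append]
          have : ('0' : Char) :: List.replicate ((lsb (a / 2)).length - (lsb (b / 2)).length) '0'
              = lsb (b / 2) ++ List.replicate ((lsb (a / 2)).length - (lsb (b / 2)).length) '0' := by
            rw [hb', lsb_zero]; rfl
          rw [this]
          have hih := ih (a / 2) (b / 2) p _ (by omega) hp' rfl
          omega
        · -- both ≥ 2
          simp only [if_neg ha2, if_neg hb2]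
          have hp' : p = (lsb (b / 2)).length - (lsb (a / 2)).length := by
            rw [hp, lsb_length_of_ge a ha2, lsb_length_of_ge b hb2]; omega
          have hq' : q = (lsb (a / 2)).length - (lsb (b / 2)).length := by
            rw [hq, lsb_length_of_ge a ha2, lsb_length_of_ge b hb2]; omega
          have hih := ih (a / 2) (b / 2) p q (by omega) hp' hq'
          omega

-- B-side identities: (c+1) - ((c+1) &&& c) is 2 ^ (trailing ones of c)
theorem and_succ_even (c : Nat) (h : c % 2 = 0) : (c + 1) &&& c = c := by
  apply Nat.eq_of_testBit_eq
  intro i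
  cases i with
  | zero =>
    simp only [Nat.testBit_zero]
    have : ¬ (c % 2 = 1) := by omega
    simp [this]
  | succ i =>
    have h2 : (c + 1) / 2 = c / 2 := by omega
    simp [Nat.testBit_add_one, Nat.and_div_two, h2]

theorem and_succ_odd (d : Nat) : (2 * d + 2) &&& (2 * d + 1) = 2 * ((d + 1) &&& d) := by
  apply Nat.eq_of_testBit_eq
  intro i
  cases i with
  | zero =>
    have e1 : (2 * d + 2) % 2 = 0 := by omega
    have e2 : (2 * ((d + 1) &&& d)) % 2 = 0 := by omega
    simp [Nat.testBit_zero, e1, e2]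
  | succ i =>
    have e1 : (2 * d + 2) / 2 = d + 1 := by omega
    have e2 : (2 * d + 1) / 2 = d := by omega
    have e3 : (2 * ((d + 1) &&& d)) / 2 = (d + 1) &&& d := by omega
    simp [Nat.testBit_add_one, Nat.and_div_two, e1, e2, e3, Nat.testBit_and]

theorem sub_and_eq_pow_tOnes (c : Nat) : (c + 1) - ((c + 1) &&& c) = 2 ^ tOnes c := by
  induction c using Nat.strong_induction_on with
  | _ c ih =>
    by_cases h : c % 2 = 0
    · rw [tOnes, if_pos h, and_succ_even c h]
      omega
    · have hd : c = 2 * (c / 2) + 1 := by omega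
      rw [tOnes, if_neg h]
      have hle : (c / 2 + 1) &&& (c / 2) ≤ c / 2 + 1 := Nat.and_le_left
      have ihd := ih (c / 2) (by omega)
      calc (c + 1) - ((c + 1) &&& c)
          = (2 * (c / 2) + 2) - ((2 * (c / 2) + 2) &&& (2 * (c / 2) + 1)) := by
            conv_lhs => rw [hd]
        _ = (2 * (c / 2) + 2) - 2 * ((c / 2 + 1) &&& (c / 2)) := by rw [and_succ_odd]
        _ = 2 * ((c / 2 + 1) - ((c / 2 + 1) &&& (c / 2))) := by omega
        _ = 2 * 2 ^ tOnes (c / 2) := by rw [ihd]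
        _ = 2 ^ (tOnes (c / 2) + 1) := by ring

-- A's value on nonnegative inputs
theorem A_value (a b : Nat) : equalPairOfBits (a : Int) (b : Int) = 2 ^ tOnes (a ^^^ b) := by
  have hbin : ∀ x : Nat, PySem.List.slice (PySem.Int.toBinChars0b (x : Int)) (some 2) none
      = (lsb x).reverse := by
    intro x
    rw [PySem.Int.toBinChars0b]
    rw [if_neg (by omega : ¬ ((x : Int) < 0))]
    rw [PySem.List.slice_from _ (by omega : (0:Int) ≤ 2)]
    rw [Int.toNat_natCast, toDigits_eq_lsb]
    rfl
  simp only [equalPairOfBits, hbin, PySem.List.len_eq, List.length_reverse]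
  set La := (lsb a).length with hLa
  set Lb := (lsb b).length with hLb
  have hLa0 : 0 < La := lsb_length_pos a
  have hLb0 : 0 < Lb := lsb_length_pos b
  by_cases hc : (Lb : Int) > (La : Int)
  · have hlt : La < Lb := by exact_mod_cast hc
    rw [if_pos hc, if_pos hc]
    have habs : ((Lb : Int) - (La : Int)).natAbs = Lb - La := by omega
    rw [habs]
    set bn := List.replicate (Lb - La) '0' ++ (lsb a).reverse with hbn
    have hbnlen : bn.length = Lb := by simp [hbn, ← hLa]; omega
    have hbmlen : ((lsb b).reverse).length = Lb := by simp [← hLb]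
    rw [hbmlen, pyRange_desc Lb]
    rw [eqLoop_take bn (lsb b).reverse (by rw [hbnlen, hbmlen]) Lb 0 (by omega)]
    have t1 : bn.take Lb = bn := by rw [← hbnlen]; exact List.take_length
    have t2 : (lsb b).reverse.take Lb = (lsb b).reverse := by rw [← hbmlen]; exact List.take_length
    have hbnr : bn.reverse = lsb a ++ List.replicate (Lb - La) '0' := by
      simp [hbn]
    rw [t1, t2, hbnr, List.reverse_reverse]
    have hz : lsb b = lsb b ++ List.replicate 0 '0' := by simp
    conv_lhs => rw [hz]
    rw [scanDiff_pad_eq_tOnes (a + b) a b (Lb - La) 0 (by omega) rfl (by omega)]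
    simp
  · have hle : Lb ≤ La := by omega
    rw [if_neg hc, if_neg hc]
    have habs : ((Lb : Int) - (La : Int)).natAbs = La - Lb := by omega
    rw [habs]
    set bm := List.replicate (La - Lb) '0' ++ (lsb b).reverse with hbm
    have hbmlen : bm.length = La := by simp [hbm, ← hLb]; omega
    have hbnlen : ((lsb a).reverse).length = La := by simp [← hLa]
    rw [hbmlen, pyRange_desc La]
    rw [eqLoop_take (lsb a).reverse bm (by rw [hbnlen, hbmlen]) La 0 (by omega)]
    have h1 : (lsb a).reverse.take La = (lsb a).reverse := by
      rw [← hbnlen]; exact List.take_length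
    have h2 : bm.take La = bm := by rw [← hbmlen]; exact List.take_length
    rw [h1, h2, List.reverse_reverse]
    have hbmr : bm.reverse = lsb b ++ List.replicate (La - Lb) '0' := by
      simp [hbm]
    rw [hbmr]
    have hz : lsb a = lsb a ++ List.replicate 0 '0' := by simp
    conv_lhs => rw [hz]
    rw [scanDiff_pad_eq_tOnes (a + b) a b 0 (La - Lb) (by omega) (by omega) rfl]
    simp

-- B's value on nonnegative inputs
theorem B_value (a b : Nat) :
    equalPairOfBits_alt (a : Int) (b : Int)
      = (((a ^^^ b) + 1) - (((a ^^^ b) + 1) &&& (a ^^^ b)) : Nat) := by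
  simp only [equalPairOfBits_alt, PySem.Int.bxor_natCast]
  set c := a ^^^ b with hc
  have hnot : Int.not (c : Int) = -(c : Int) - 1 := by
    show Int.not (Int.ofNat c) = _
    rw [Int.not]
    rw [Int.negSucc_eq]
    ring
  rw [hnot, PySem.Int.band]
  rw [if_neg (by omega : ¬ (0 : Int) ≤ -(c : Int) - 1)]
  rw [if_pos (by omega : (0 : Int) ≤ (c : Int) + 1)]
  have e1 : ((c : Int) + 1).toNat = c + 1 := by omega
  have e2 : (-(-(c : Int) - 1) - 1).toNat = c := by omega
  rw [e1, e2]

-- ===== VERDICT (by name: the statement is the Claim_ definition above) =====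
theorem equalPairOfBits_spec : Claim_equal_equalPairOfBits := by
  intro n m _ hpre
  obtain ⟨a, rfl⟩ := Int.eq_ofNat_of_zero_le hpre.1
  obtain ⟨b, rfl⟩ := Int.eq_ofNat_of_zero_le hpre.2
  unfold Spec_equalPairOfBits
  rw [A_value, B_value, sub_and_eq_pow_tOnes]
  push_cast
  ring
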